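-- pv_equiv track=rewrite | github.com/ifahimkhan/leetcode | code/436_solution.py | two_arrays_with_map
-- ===== SOURCE A (Python) =====
-- def two_arrays_with_map(intervals):
--     n = len(intervals)
--
--     # O(N) time / space
--     itv_to_idx = {tuple(itv): i for i, itv in enumerate(intervals)}
--
--     # O(N) time / space
--     end_intervals = intervals.copy()
--
--     # O(NlogN)
--     intervals.sort()
--     end_intervals.sort(key = lambda x: x[1])
--
--     j = 0
--     results = [-1] * n
--     # O(N) construct results
--     for i, itv in enumerate(end_intervals): # O(N) outer loop
--         while j < n and intervals[j][0] < itv[1]: j += 1 # O(N) in total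
--         if j < n: results[itv_to_idx[tuple(itv)]] = itv_to_idx[tuple(intervals[j])]
--     return results
-- ===== SOURCE B (Python) =====
-- def two_arrays_with_map(intervals):
--     n = len(intervals)
--     itv_to_idx = {tuple(itv): i for i, itv in enumerate(intervals)}
--     end_sorted = sorted(intervals, key=lambda x: x[1])
--     intervals.sort()  # same in-place sort as the original
--     starts = [itv[0] for itv in intervals]
--     results = [-1] * n
--     for itv in end_sorted:
--         e = itv[1]
--         lo, hi = 0, n
--         while lo < hi:
--             mid = (lo + hi) // 2
--             if starts[mid] < e:
--                 lo = mid + 1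
--             else:
--                 hi = mid
--         if lo < n:
--             results[itv_to_idx[tuple(itv)]] = itv_to_idx[tuple(intervals[lo])]
--     return results
-- ===== Notes on version B (the rewrite author's own statement) =====
-- stated objective: alternative
-- what changed: Replaces A's coordinated two-pointer sweep (a monotone index advanced across both sorted lists at once) with an independent hand-written binary search over the sorted start values for each end-sorted interval.
import Mathlib
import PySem

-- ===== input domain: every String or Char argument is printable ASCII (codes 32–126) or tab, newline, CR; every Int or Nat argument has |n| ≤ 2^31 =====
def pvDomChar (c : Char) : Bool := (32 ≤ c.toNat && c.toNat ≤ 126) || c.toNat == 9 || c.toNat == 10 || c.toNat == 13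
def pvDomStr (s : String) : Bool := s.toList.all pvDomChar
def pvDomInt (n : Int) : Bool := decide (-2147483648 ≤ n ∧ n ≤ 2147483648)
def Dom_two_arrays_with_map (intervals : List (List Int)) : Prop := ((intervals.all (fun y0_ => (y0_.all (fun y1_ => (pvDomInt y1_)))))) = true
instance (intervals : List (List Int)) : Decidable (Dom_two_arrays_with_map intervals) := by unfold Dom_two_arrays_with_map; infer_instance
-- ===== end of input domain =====

-- B replaces A's coordinated two-pointer sweep by an independent hand-written binary search over
-- the sorted starts for each end-sorted interval (alternative algorithm, same O(N log N) cost).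
-- Like A, B sorts the `intervals` argument in place; the equivalence proved here is about the
-- return value (both perform the same in-place sort).

-- ===== PORT A =====
-- Python's `intervals.sort()` (lexicographic list comparison) and the sort by end key,
-- shared verbatim by both sources
def pvSortLex (xs : List (List Int)) : List (List Int) :=
  PySem.List.sorted xs (fun x => x) false
def pvSortEnd (xs : List (List Int)) : List (List Int) :=
  PySem.List.sorted xs (fun x => PySem.List.pyGetD x 1 0) false

-- the `while j < n and intervals[j][0] < itv[1]: j += 1` loop
def pvAdvance (srt : List (List Int)) (n e j : Int) : Int :=
  if h : j < n ∧ PySem.List.pyGetD (PySem.List.pyGetD srt j []) 0 0 < e then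
    pvAdvance srt n e (j + 1)
  else j
termination_by (n - j).toNat
decreasing_by omega

def two_arrays_with_map (intervals : List (List Int)) : List Int :=
  let n : Int := PySem.List.len intervals
  let itvToIdx : PySem.Dict (List Int) Int :=
    (PySem.List.enumerate intervals).foldl (fun d p => d.insert p.2 p.1) PySem.Dict.empty
  let endIntervals := intervals
  let srt := pvSortLex intervals
  let endSorted := pvSortEnd endIntervals
  let fin := (PySem.List.enumerate endSorted).foldl
    (fun (st : Int × List Int) p =>
      let j := pvAdvance srt n (PySem.List.pyGetD p.2 1 0) st.1
      if j < n then
        (j, PySem.List.pySetD st.2 (PySem.Dict.getD itvToIdx p.2 0)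
              (PySem.Dict.getD itvToIdx (PySem.List.pyGetD srt j []) 0))
      else (j, st.2))
    (0, List.replicate n.toNat (-1))
  fin.2

-- ===== PORT B =====
-- the hand-written `while lo < hi` binary search of Source B
def pvBisect (starts : List Int) (e lo hi : Int) : Int :=
  if h : lo < hi then
    let mid := PySem.Int.floordiv (lo + hi) 2
    if PySem.List.pyGetD starts mid 0 < e then pvBisect starts e (mid + 1) hi
    else pvBisect starts e lo mid
  else lo
termination_by (hi - lo).toNat
decreasing_by
  · have hm : PySem.Int.floordiv (lo + hi) 2 = (lo + hi) / 2 :=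
      PySem.Int.floordiv_eq_ediv_of_pos (by omega)
    omega
  · have hm : PySem.Int.floordiv (lo + hi) 2 = (lo + hi) / 2 :=
      PySem.Int.floordiv_eq_ediv_of_pos (by omega)
    omega

def two_arrays_with_map_alt (intervals : List (List Int)) : List Int :=
  let n : Int := PySem.List.len intervals
  let itvToIdx : PySem.Dict (List Int) Int :=
    (PySem.List.enumerate intervals).foldl (fun d p => d.insert p.2 p.1) PySem.Dict.empty
  let endSorted := pvSortEnd intervals
  let srt := pvSortLex intervals
  let starts := srt.map (fun itv => PySem.List.pyGetD itv 0 0)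
  endSorted.foldl
    (fun res itv =>
      let lo := pvBisect starts (PySem.List.pyGetD itv 1 0) 0 n
      if lo < n then
        PySem.List.pySetD res (PySem.Dict.getD itvToIdx itv 0)
          (PySem.Dict.getD itvToIdx (PySem.List.pyGetD srt lo []) 0)
      else res)
    (List.replicate n.toNat (-1))

-- ===== PRECONDITION & SPEC =====
-- Pre_ excludes exactly the inputs where A raises: an interval with fewer than 2 elements makes
-- the sort key `x[1]` (or `intervals[j][0]`) raise IndexError in A (and in B alike).
def Pre_two_arrays_with_map (intervals : List (List Int)) : Prop :=
  ∀ itv ∈ intervals, 2 ≤ itv.length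
instance (intervals : List (List Int)) : Decidable (Pre_two_arrays_with_map intervals) := by
  unfold Pre_two_arrays_with_map; infer_instance

def pvWitness_two_arrays_with_map : List (List Int) := [[3, 4], [2, 3], [1, 2]]

def Spec_two_arrays_with_map (intervals : List (List Int)) (out : List Int) : Prop :=
  out = two_arrays_with_map_alt intervals
instance (intervals : List (List Int)) (out : List Int) : Decidable (Spec_two_arrays_with_map intervals out) := by
  unfold Spec_two_arrays_with_map; infer_instance

-- ===== CLAIM (what is proved, stated in full; the proofs are below) =====
def Claim_equal_two_arrays_with_map : Prop := ∀ (intervals : List (List Int)), Dom_two_arrays_with_map intervals → Pre_two_arrays_with_map intervals → Spec_two_arrays_with_map intervals (two_arrays_with_map intervals)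

-- ===== LEMMAS AND PROOFS =====

-- r is the bisect_left position of e in starts
def pvIsBL (starts : List Int) (e r : Int) : Prop :=
  0 ≤ r ∧ r ≤ starts.length ∧
  (∀ k : Nat, k < r.toNat → starts.getD k 0 < e) ∧
  (∀ k : Nat, r ≤ (k : Int) → k < starts.length → e ≤ starts.getD k 0)

lemma pvIsBL_unique {s : List Int} {e r1 r2 : Int}
    (h1 : pvIsBL s e r1) (h2 : pvIsBL s e r2) : r1 = r2 := by
  obtain ⟨h10, h1n, h1lt, h1ge⟩ := h1
  obtain ⟨h20, h2n, h2lt, h2ge⟩ := h2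
  by_contra hne
  rcases lt_trichotomy r1 r2 with h | h | h
  · have ha := h2lt r1.toNat (by omega)
    have hb := h1ge r1.toNat (by omega) (by omega)
    omega
  · exact hne h
  · have ha := h1lt r2.toNat (by omega)
    have hb := h2ge r2.toNat (by omega) (by omega)
    omega

lemma pvGetD_mono (s : List Int) (hmono : s.Pairwise (· ≤ ·)) (p q : Nat)
    (hpq : p ≤ q) (hq : q < s.length) : s.getD p 0 ≤ s.getD q 0 := by
  rcases eq_or_lt_of_le hpq with h | h
  · subst h; exact le_refl _
  · rw [List.getD_eq_getElem s 0 (by omega), List.getD_eq_getElem s 0 hq]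
    exact List.pairwise_iff_getElem.1 hmono p q (by omega) hq h

-- the condition A's while loop reads, in terms of B's starts array
lemma pvCond_eq (srt : List (List Int)) (j : Int) (h0 : 0 ≤ j) (hj : j < (srt.length : Int)) :
    PySem.List.pyGetD (PySem.List.pyGetD srt j []) 0 0
      = (srt.map (fun itv => PySem.List.pyGetD itv 0 0)).getD j.toNat 0 := by
  rw [PySem.List.pyGetD_eq_getElem srt [] h0 hj]
  rw [List.getD_eq_getElem _ 0 (by simp; omega)]
  simp

theorem pvAdvance_isBL (srt : List (List Int)) (e j : Int)
    (hmono : (srt.map (fun itv => PySem.List.pyGetD itv 0 0)).Pairwise (· ≤ ·))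
    (h0 : 0 ≤ j) (hn : j ≤ (srt.length : Int))
    (hlt : ∀ k : Nat, (k : Int) < j →
      (srt.map (fun itv => PySem.List.pyGetD itv 0 0)).getD k 0 < e) :
    pvIsBL (srt.map (fun itv => PySem.List.pyGetD itv 0 0)) e
      (pvAdvance srt (srt.length : Int) e j) := by
  rw [pvAdvance]
  split
  · rename_i h
    refine pvAdvance_isBL srt e (j + 1) hmono (by omega) (by omega) ?_
    intro k hk
    rcases lt_or_ge (k : Int) j with hkj | hkj
    · exact hlt k hkj
    · have hc := h.2
      rw [pvCond_eq srt j h0 h.1] at hc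
      have hkeq : k = j.toNat := by omega
      rw [hkeq]; exact hc
  · rename_i h
    push_neg at h
    refine ⟨h0, by simpa using hn, fun k hk => hlt k (by omega), fun k hjk hk => ?_⟩
    have hjn : j < (srt.length : Int) := by rw [List.length_map] at hk; omega
    have hc := h hjn
    rw [pvCond_eq srt j h0 hjn] at hc
    have := pvGetD_mono _ hmono j.toNat k (by omega) hk
    omega
termination_by ((srt.length : Int) - j).toNat
decreasing_by omega

theorem pvBisect_isBL (starts : List Int) (e lo hi : Int)
    (hmono : starts.Pairwise (· ≤ ·))
    (h0 : 0 ≤ lo) (hlh : lo ≤ hi) (hhn : hi ≤ (starts.length : Int))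
    (hlo : ∀ k : Nat, (k : Int) < lo → starts.getD k 0 < e)
    (hhi : ∀ k : Nat, hi ≤ (k : Int) → k < starts.length → e ≤ starts.getD k 0) :
    pvIsBL starts e (pvBisect starts e lo hi) := by
  rw [pvBisect]
  split
  · rename_i h
    have hm : PySem.Int.floordiv (lo + hi) 2 = (lo + hi) / 2 :=
      PySem.Int.floordiv_eq_ediv_of_pos (by omega)
    have hb1 : lo ≤ PySem.Int.floordiv (lo + hi) 2 := by omega
    have hb2 : PySem.Int.floordiv (lo + hi) 2 < hi := by omega
    have hget : PySem.List.pyGetD starts (PySem.Int.floordiv (lo + hi) 2) 0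
        = starts.getD (PySem.Int.floordiv (lo + hi) 2).toNat 0 := by
      rw [PySem.List.pyGetD_eq_getElem starts 0 (by omega) (by omega)]
      rw [List.getD_eq_getElem _ 0 (by omega)]
    by_cases hc : PySem.List.pyGetD starts (PySem.Int.floordiv (lo + hi) 2) 0 < e
    · simp only [if_pos hc]
      rw [hget] at hc
      refine pvBisect_isBL starts e _ hi hmono (by omega) (by omega) hhn ?_ hhi
      intro k hk
      rcases lt_or_ge (k : Int) lo with hkl | hkl
      · exact hlo k hkl
      · have := pvGetD_mono starts hmono k (PySem.Int.floordiv (lo + hi) 2).toNat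
          (by omega) (by omega)
        omega
    · simp only [if_neg hc]
      rw [hget] at hc
      refine pvBisect_isBL starts e lo _ hmono h0 (by omega) (by omega) hlo ?_
      intro k hk hk2
      have := pvGetD_mono starts hmono (PySem.Int.floordiv (lo + hi) 2).toNat k
        (by omega) hk2
      omega
  · rename_i h
    exact ⟨h0, by omega, fun k hk => hlo k (by omega), fun k hk hk2 => hhi k (by omega) hk2⟩
termination_by (hi - lo).toNat
decreasing_by
  · have hm : PySem.Int.floordiv (lo + hi) 2 = (lo + hi) / 2 :=
      PySem.Int.floordiv_eq_ediv_of_pos (by omega)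
    omega
  · have hm : PySem.Int.floordiv (lo + hi) 2 = (lo + hi) / 2 :=
      PySem.Int.floordiv_eq_ediv_of_pos (by omega)
    omega

-- the two result-building loops agree
lemma pvLoop_eq (srt : List (List Int)) (d : PySem.Dict (List Int) Int) (n : Int)
    (hn : n = (srt.length : Int))
    (hmono : (srt.map (fun itv => PySem.List.pyGetD itv 0 0)).Pairwise (· ≤ ·)) :
    ∀ (es : List (List Int)) (s j : Int) (res : List Int),
      es.Pairwise (fun a b => PySem.List.pyGetD a 1 0 ≤ PySem.List.pyGetD b 1 0) →
      0 ≤ j → j ≤ n →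
      (∀ itv ∈ es, ∀ k : Nat, (k : Int) < j →
        (srt.map (fun itv => PySem.List.pyGetD itv 0 0)).getD k 0 < PySem.List.pyGetD itv 1 0) →
      ((PySem.List.enumerate es s).foldl
        (fun (st : Int × List Int) p =>
          let j := pvAdvance srt n (PySem.List.pyGetD p.2 1 0) st.1
          if j < n then
            (j, PySem.List.pySetD st.2 (PySem.Dict.getD d p.2 0)
                  (PySem.Dict.getD d (PySem.List.pyGetD srt j []) 0))
          else (j, st.2))
        (j, res)).2
      = es.foldl
        (fun res itv =>
          let lo := pvBisect (srt.map (fun itv => PySem.List.pyGetD itv 0 0))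
            (PySem.List.pyGetD itv 1 0) 0 n
          if lo < n then
            PySem.List.pySetD res (PySem.Dict.getD d itv 0)
              (PySem.Dict.getD d (PySem.List.pyGetD srt lo []) 0)
          else res)
        res := by
  intro es
  induction es with
  | nil => intro s j res _ _ _ _; simp [PySem.List.enumerate_nil]
  | cons itv es ih =>
    intro s j res hord h0 hjn hlt
    rw [PySem.List.enumerate_cons, List.foldl_cons, List.foldl_cons]
    have hisA : pvIsBL (srt.map (fun itv => PySem.List.pyGetD itv 0 0))
        (PySem.List.pyGetD itv 1 0) (pvAdvance srt n (PySem.List.pyGetD itv 1 0) j) := by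
      rw [hn]
      exact pvAdvance_isBL srt _ j hmono h0 (by omega)
        (fun k hk => hlt itv (by simp) k hk)
    have hisB : pvIsBL (srt.map (fun itv => PySem.List.pyGetD itv 0 0))
        (PySem.List.pyGetD itv 1 0)
        (pvBisect (srt.map (fun itv => PySem.List.pyGetD itv 0 0))
          (PySem.List.pyGetD itv 1 0) 0 n) := by
      rw [hn]
      exact pvBisect_isBL _ _ 0 _ hmono (by omega) (by positivity) (by simp)
        (fun k hk => by exfalso; omega)
        (fun k hk hk2 => by exfalso; rw [List.length_map] at hk2; simp at hk; omega)
    have hjj : pvAdvance srt n (PySem.List.pyGetD itv 1 0) j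
        = pvBisect (srt.map (fun itv => PySem.List.pyGetD itv 0 0))
            (PySem.List.pyGetD itv 1 0) 0 n := pvIsBL_unique hisA hisB
    simp only []
    rw [hjj]
    set j' := pvBisect (srt.map (fun itv => PySem.List.pyGetD itv 0 0))
      (PySem.List.pyGetD itv 1 0) 0 n with hj'
    have hnext : ∀ (res' : List Int),
        ((PySem.List.enumerate es (s+1)).foldl
          (fun (st : Int × List Int) p =>
            let j := pvAdvance srt n (PySem.List.pyGetD p.2 1 0) st.1
            if j < n then
              (j, PySem.List.pySetD st.2 (PySem.Dict.getD d p.2 0)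
                    (PySem.Dict.getD d (PySem.List.pyGetD srt j []) 0))
            else (j, st.2))
          (j', res')).2
        = es.foldl
          (fun res itv =>
            let lo := pvBisect (srt.map (fun itv => PySem.List.pyGetD itv 0 0))
              (PySem.List.pyGetD itv 1 0) 0 n
            if lo < n then
              PySem.List.pySetD res (PySem.Dict.getD d itv 0)
                (PySem.Dict.getD d (PySem.List.pyGetD srt lo []) 0)
            else res)
          res' := by
      intro res'
      refine ih (s+1) j' res' (List.Pairwise.of_cons hord) hisB.1
        (by rw [hn]; have := hisB.2.1; simpa using this) ?_
      intro itv' hmem k hk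
      have h1 := hisB.2.2.1 k (by omega)
      have h2 : PySem.List.pyGetD itv 1 0 ≤ PySem.List.pyGetD itv' 1 0 :=
        (List.pairwise_cons.1 hord).1 itv' hmem
      omega
    by_cases hcase : j' < n
    · simp only [if_pos hcase]; exact hnext _
    · simp only [if_neg hcase]; exact hnext _

-- `sorted` does not depend on which (definitionally equal) order instances elaboration picked
lemma pvSorted_inst_irrel {α κ : Type} (i1 i2 : LT κ) (d1 : @DecidableLT κ i1)
    (d2 : @DecidableLT κ i2) (h : i1 = i2) (xs : List α) (key : α → κ) :
    @PySem.List.sorted α κ i1 d1 xs key false = @PySem.List.sorted α κ i2 d2 xs key false := by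
  subst h
  exact congrArg (fun d => @PySem.List.sorted α κ i1 d xs key false)
    (funext fun a => funext fun b => Subsingleton.elim (d1 a b) (d2 a b))

lemma pvSortLex_eq (xs : List (List Int)) :
    pvSortLex xs = @PySem.List.sorted (List Int) (List Int) List.instLinearOrder.toLT
      LinearOrder.toDecidableLT xs (fun x => x) false := by
  unfold pvSortLex
  exact pvSorted_inst_irrel _ _ _ _ (by rfl) xs _

lemma pvSortEnd_eq (xs : List (List Int)) :
    pvSortEnd xs = @PySem.List.sorted (List Int) Int Int.instLinearOrder.toLT
      LinearOrder.toDecidableLT xs (fun x => PySem.List.pyGetD x 1 0) false := by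
  unfold pvSortEnd
  exact pvSorted_inst_irrel _ _ _ _ (by rfl) xs _

-- basic facts about the shared sorts
lemma pvLenSortLex (xs : List (List Int)) : (pvSortLex xs).length = xs.length := by
  unfold pvSortLex
  exact PySem.List.length_sorted xs (fun x => x) false

lemma pvMemSortLex (xs : List (List Int)) (a : List Int) : a ∈ pvSortLex xs ↔ a ∈ xs := by
  unfold pvSortLex
  exact PySem.List.mem_sorted xs (fun x => x) false a

lemma pvEndPairwise (xs : List (List Int)) :
    (pvSortEnd xs).Pairwise (fun a b => PySem.List.pyGetD a 1 0 ≤ PySem.List.pyGetD b 1 0) := by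
  rw [pvSortEnd_eq]
  exact PySem.List.sorted_pairwise xs (fun x => PySem.List.pyGetD x 1 0)

-- the in-place sort of the first components is nondecreasing
lemma pvStartsMono (intervals : List (List Int))
    (hpre : ∀ itv ∈ intervals, 2 ≤ itv.length) :
    ((pvSortLex intervals).map (fun itv => PySem.List.pyGetD itv 0 0)).Pairwise (· ≤ ·) := by
  rw [List.pairwise_map]
  have hs : (pvSortLex intervals).Pairwise (fun a b => a ≤ b) := by
    rw [pvSortLex_eq]
    exact PySem.List.sorted_pairwise intervals (fun x => x)
  refine hs.imp_of_mem ?_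
  intro a b ha hb hab
  have ha2 : 2 ≤ a.length := hpre a ((pvMemSortLex intervals a).1 ha)
  have hb2 : 2 ≤ b.length := hpre b ((pvMemSortLex intervals b).1 hb)
  cases a with
  | nil => simp at ha2
  | cons x as =>
    cases b with
    | nil => simp at hb2
    | cons y bs =>
      simp only [PySem.List.pyGetD_zero_cons]
      rcases lt_or_eq_of_le hab with h | h
      · rw [List.cons_lt_cons_iff] at h
        rcases h with h | ⟨h, _⟩ <;> omega
      · simp_all

-- ===== VERDICT (by name: the statement is the Claim_ definition above) =====
theorem two_arrays_with_map_spec : Claim_equal_two_arrays_with_map := by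
  intro intervals _hdom hpre
  unfold Spec_two_arrays_with_map
  simp only [two_arrays_with_map, two_arrays_with_map_alt, PySem.List.len_eq]
  exact pvLoop_eq (pvSortLex intervals)
    ((PySem.List.enumerate intervals).foldl (fun d p => d.insert p.2 p.1) PySem.Dict.empty)
    (intervals.length : Int) (by rw [pvLenSortLex])
    (pvStartsMono intervals hpre)
    (pvSortEnd intervals) 0 0
    (List.replicate (intervals.length : Int).toNat (-1))
    (pvEndPairwise intervals)
    (by omega) (by omega) (fun itv _ k hk => by exfalso; omega)
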